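-- pv_equiv track=rewrite | github.com/anchore/vunnel | src/vunnel/providers/nvd/parser.py | escape_for_cpe23_fs
-- ===== SOURCE A (Python) =====
-- encode_dict = {
--     "!": "%21",
--     '"': "%22",
--     "#": "%23",
--     "$": "%24",
--     "%": "%25",
--     "&": "%26",
--     "'": "%27",
--     "(": "%28",
--     ")": "%29",
--     "*": "%2a",
--     "+": "%2b",
--     ",": "%2c",
--     # '-': '-',  # not affected by transformation between formatted string and uri, only impacts wfn
--     # '.': '.',  # not affected by transformation between formatted string and uri, only impacts wfn
--     "/": "%2f",
--     ":": "%3a",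
--     ";": "%3b",
--     "<": "%3c",
--     "=": "%3d",
--     ">": "%3e",
--     "?": "%3f",
--     "@": "%40",
--     "[": "%5b",
--     "\\": "%5c",
--     "]": "%5d",
--     "^": "%5e",
--     "`": "%60",
--     "{": "%7b",
--     "|": "%7c",
--     "}": "%7d",
--     "~": "%7e",
-- }
--
-- def escape_for_cpe23_fs(element):
--     """
--     Helper method for escaping special characters as per the CPE 2.3 formatted string spec
--
--     :param element:
--     :return: escaped element string as per CPE 2.3 formatted string spec
--     """
--
--     if not isinstance(element, str):
--         raise Exception("Value to be escaped is not a string")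
--
--     if element in ["*", "-", ""]:  # let these pass through as they are
--         return element
--     elif any(char in encode_dict for char in element):
--         new_element = str()
--         pos = 0
--         while pos < len(element):
--             char = element[pos]
--
--             if char == "\\":  # this might be an escape character, check to see if the next character requires escape
--                 pos += 1
--                 if pos < len(element):
--                     n_char = element[pos]
--                     if n_char in encode_dict:  # definitely an escaped sequence, preserve it as it is
--                         new_element += char + n_char
--                     else:  # just a \ that needs to be escaped
--                         new_element += "\\" + char + n_char
--                 else:  # last char is unescaped \, just add an escape
--                     new_element += "\\" + char
--             elif char in encode_dict:
--                 new_element += "\\" + char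
--             else:
--                 new_element += char
--
--             pos += 1
--
--         return new_element
--     return element
-- ===== SOURCE B (Python) =====
-- encode_dict = {
--     "!": "%21", '"': "%22", "#": "%23", "$": "%24", "%": "%25", "&": "%26",
--     "'": "%27", "(": "%28", ")": "%29", "*": "%2a", "+": "%2b", ",": "%2c",
--     "/": "%2f", ":": "%3a", ";": "%3b", "<": "%3c", "=": "%3d", ">": "%3e",
--     "?": "%3f", "@": "%40", "[": "%5b", "\\": "%5c", "]": "%5d", "^": "%5e",
--     "`": "%60", "{": "%7b", "|": "%7c", "}": "%7d", "~": "%7e",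
-- }
--
--
-- def escape_for_cpe23_fs(element):
--     """CPE 2.3 formatted-string escaping by run-length decomposition: the string
--     is cut into maximal backslash runs and maximal backslash-free segments; a
--     run of r backslashes contributes r//2 escaped pairs, and when r is odd the
--     leftover backslash pairs with the very next character; segment characters
--     are escaped independently of each other."""
--     if not isinstance(element, str):
--         raise Exception("Value to be escaped is not a string")
--
--     if element in ("*", "-", ""):
--         return element
--
--     pieces = []
--     i, n = 0, len(element)
--     while i < n:
--         j = i
--         if element[i] == "\\":
--             while j < n and element[j] == "\\":
--                 j += 1
--             r = j - i
--             pieces.append("\\\\" * (r // 2))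
--             if r % 2:  # leftover backslash pairs with the next char, if any
--                 if j < n:
--                     c = element[j]
--                     j += 1
--                     pieces.append(("\\" + c) if c in encode_dict else ("\\\\" + c))
--                 else:
--                     pieces.append("\\\\")
--         else:
--             while j < n and element[j] != "\\":
--                 j += 1
--             pieces.append("".join(("\\" + c) if c in encode_dict else c
--                                   for c in element[i:j]))
--         i = j
--     return "".join(pieces)
-- ===== Notes on version B (the rewrite author's own statement) =====
-- stated objective: alternative
-- what changed: Replaces A's any()-pre-scan plus per-character while loop with single-character lookahead by a run-length decomposition: the string is cut into maximal backslash runs and backslash-free segments, a run of r backslashes emits r//2 escaped pairs plus (when r is odd) one pair formed with the following character, and segment characters are escaped independently.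
import Mathlib
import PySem

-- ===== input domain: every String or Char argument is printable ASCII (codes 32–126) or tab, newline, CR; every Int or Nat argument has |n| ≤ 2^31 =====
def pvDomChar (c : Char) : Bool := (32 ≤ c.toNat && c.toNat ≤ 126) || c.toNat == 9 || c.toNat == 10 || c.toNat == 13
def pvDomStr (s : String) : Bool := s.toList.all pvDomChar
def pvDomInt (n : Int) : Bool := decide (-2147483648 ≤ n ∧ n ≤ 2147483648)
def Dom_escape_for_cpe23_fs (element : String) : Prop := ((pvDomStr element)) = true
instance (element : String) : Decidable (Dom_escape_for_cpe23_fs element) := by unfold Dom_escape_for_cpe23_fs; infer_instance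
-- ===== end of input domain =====

-- B replaces A's pre-scan + per-character lookahead loop by a run-length decomposition
-- into maximal backslash runs and backslash-free segments (objective: alternative).
-- Return values proved equal on all Dom strings.

-- ===== PORT A =====
-- keys of encode_dict; 'char in encode_dict' is membership in these keys
def pvSpecial (c : Char) : Bool := c ∈ "!\"#$%&'()*+,/:;<=>?@[\\]^`{|}~".toList

-- A's while loop: index stepping becomes recursion on the remaining characters,
-- with the same lookahead branch structure
def pvLoopA : List Char → List Char
  | [] => []
  | c :: rest =>
    if c = '\\' then
      match rest with
      | [] => ['\\', '\\']                                    -- last char is unescaped \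
      | n :: rest' =>
        (if pvSpecial n then ['\\', n] else ['\\', '\\', n]) ++ pvLoopA rest'
    else if pvSpecial c then ['\\', c] ++ pvLoopA rest
    else c :: pvLoopA rest

def escape_for_cpe23_fs (element : String) : String :=
  if element = "*" ∨ element = "-" ∨ element = "" then element
  else if element.toList.any pvSpecial then String.ofList (pvLoopA element.toList)
  else element

-- ===== PORT B =====
-- escaping of one character of a backslash-free segment
def pvTrans (c : Char) : List Char := if pvSpecial c then ['\\', c] else [c]

-- the pair formed by a leftover (odd) backslash with the following character
def pvPair (c : Char) : List Char :=
  if pvSpecial c then ['\\', c] else ['\\', '\\', c]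

-- B's outer while loop: each step consumes one maximal run (a backslash run —
-- plus the following char when the run length is odd — or a backslash-free segment)
def pvLoopB : List Char → List Char
  | [] => []
  | c :: rest =>
    if c = '\\' then
      let r := (rest.takeWhile (fun d => d == '\\')).length + 1
      let rest' := rest.dropWhile (fun d => d == '\\')
      (List.replicate (r / 2) ['\\', '\\']).flatten ++
        (if r % 2 = 1 then
          match h : rest' with
          | [] => ['\\', '\\']
          | d :: rest'' => pvPair d ++ pvLoopB rest''
        else pvLoopB rest')
    else
      (c :: rest.takeWhile (fun d => ¬ d == '\\')).flatMap pvTrans ++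
        pvLoopB (rest.dropWhile (fun d => ¬ d == '\\'))
  termination_by l => l.length
  decreasing_by
  all_goals simp_wf
  · have h1 := List.length_dropWhile_le (fun d => d == '\\') rest
    have h2 : (List.dropWhile (fun d => d == '\\') rest).length = rest''.length + 1 := by
      have h' : (List.dropWhile (fun d => d == '\\') rest) = d :: rest'' := h
      rw [h']; simp
    omega
  · have h1 := List.length_dropWhile_le (fun d => d == '\\') rest
    omega
  · have h1 := List.length_dropWhile_le (fun d => !d == '\\') rest
    omega

def escape_for_cpe23_fs_alt (element : String) : String :=
  if element = "*" ∨ element = "-" ∨ element = "" then element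
  else String.ofList (pvLoopB element.toList)

-- ===== PRECONDITION & SPEC =====
def Spec_escape_for_cpe23_fs (element : String) (out : String) : Prop := out = escape_for_cpe23_fs_alt element
instance (element : String) (out : String) : Decidable (Spec_escape_for_cpe23_fs element out) := by unfold Spec_escape_for_cpe23_fs; infer_instance

-- ===== CLAIM (what is proved, stated in full; the proofs are below) =====
def Claim_equal_escape_for_cpe23_fs : Prop := ∀ (element : String), Dom_escape_for_cpe23_fs element → Spec_escape_for_cpe23_fs element (escape_for_cpe23_fs element)

-- ===== LEMMAS AND PROOFS =====

-- handling of the char following a leftover backslash, A-side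
def pvCarryA : List Char → List Char
  | [] => ['\\', '\\']
  | d :: y' => pvPair d ++ pvLoopA y'

theorem pvLoopA_seg (x : List Char) (y : List Char) (hx : ∀ c ∈ x, c ≠ '\\') :
    pvLoopA (x ++ y) = x.flatMap pvTrans ++ pvLoopA y := by
  induction x with
  | nil => simp
  | cons c xs ih =>
    have hc : c ≠ '\\' := hx c (by simp)
    conv_lhs => rw [pvLoopA.eq_def]
    by_cases hs : pvSpecial c <;>
      simp [hc, hs, pvTrans, ih (fun d hd => hx d (by simp [hd]))]

theorem pvLoopA_run (r : Nat) (y : List Char) (hy : ∀ c, y.head? = some c → c ≠ '\\') :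
    pvLoopA (List.replicate r '\\' ++ y) =
      (List.replicate (r / 2) ['\\', '\\']).flatten ++
        (if r % 2 = 1 then pvCarryA y else pvLoopA y) := by
  induction r using Nat.strong_induction_on with
  | _ r ih =>
    match r with
    | 0 => simp
    | 1 =>
      match y with
      | [] => simp [pvLoopA, pvCarryA]
      | d :: y' =>
        have hd : d ≠ '\\' := hy d rfl
        conv_lhs => rw [List.replicate, List.replicate]
        rw [pvLoopA.eq_def]
        simp [pvCarryA, pvPair]
    | (r' + 2) =>
      conv_lhs => rw [List.replicate, List.replicate]
      rw [pvLoopA.eq_def]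
      have hsp : pvSpecial '\\' = true := by decide
      simp only [List.cons_append, hsp, if_true]
      rw [ih r' (by omega)]
      have h2 : (r' + 2) / 2 = r' / 2 + 1 := by omega
      have h3 : (r' + 2) % 2 = r' % 2 := by omega
      rw [h2, h3, List.replicate_succ, List.flatten_cons]
      simp

theorem pvAll_bs_replicate (x : List Char) (hx : ∀ c ∈ x, c = '\\') :
    x = List.replicate x.length '\\' := by
  induction x with
  | nil => simp
  | cons c xs ih =>
    simp only [List.length_cons, List.replicate_succ]
    rw [hx c (by simp), ← ih (fun d hd => hx d (by simp [hd]))]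

theorem pvLoopA_eq_loopB (n : Nat) : ∀ (l : List Char), l.length ≤ n → pvLoopA l = pvLoopB l := by
  induction n with
  | zero =>
    intro l hl
    have : l = [] := List.eq_nil_of_length_eq_zero (Nat.le_zero.mp hl)
    subst this
    rw [pvLoopA.eq_def, pvLoopB.eq_def]
  | succ n ih =>
    intro l hl
    match l with
    | [] => rw [pvLoopA.eq_def, pvLoopB.eq_def]
    | c :: rest =>
      by_cases hc : c = '\\'
      · subst hc
        set t := rest.takeWhile (fun d => d == '\\') with ht
        set w := rest.dropWhile (fun d => d == '\\') with hw
        have hrest : rest = t ++ w := (List.takeWhile_append_dropWhile).symm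
        have htbs : ∀ d ∈ t, d = '\\' := by
          intro d hd
          have := List.mem_takeWhile_imp (l := rest) (p := fun d => d == '\\') (ht ▸ hd)
          simpa using this
        have hwhead : ∀ d, w.head? = some d → d ≠ '\\' := by
          intro d hd
          have := List.head?_dropWhile_not (p := fun d => d == '\\') rest
          rw [← hw] at this
          intro he
          rw [hd] at this
          simp [he] at this
        have hrep : t = List.replicate t.length '\\' := pvAll_bs_replicate t htbs
        have hsplit : ('\\' :: rest : List Char) = List.replicate (t.length + 1) '\\' ++ w := by
          rw [List.replicate_succ, hrest]
          conv_lhs => rw [hrep]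
          simp
        conv_lhs => rw [hsplit]
        rw [pvLoopA_run (t.length + 1) w hwhead]
        rw [pvLoopB.eq_def]
        simp only [← ht, ← hw]
        have hlen : t.length + w.length = rest.length := by
          rw [hrest]; simp
        simp only [List.length_cons] at hl
        congr 1
        by_cases hodd : (t.length + 1) % 2 = 1
        · rw [if_pos hodd, if_pos hodd]
          split
          · rename_i heq
            have hnil : w = [] := hw.trans heq
            simp [pvCarryA, hnil]
          · rename_i d w' heq
            have hwc : w = d :: w' := hw.trans heq
            have hrec : pvLoopA w' = pvLoopB w' := by
              apply ih
              have h5 : w.length = w'.length + 1 := by rw [hwc]; simp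
              omega
            simp [pvCarryA, hwc, hrec]
        · rw [if_neg hodd, if_neg hodd]
          exact ih w (by omega)
      · set t := rest.takeWhile (fun d => ¬ d == '\\') with ht
        set w := rest.dropWhile (fun d => ¬ d == '\\') with hw
        have hrest : rest = t ++ w := (List.takeWhile_append_dropWhile).symm
        have htn : ∀ d ∈ (c :: t), d ≠ '\\' := by
          intro d hd
          rcases List.mem_cons.mp hd with h | h
          · exact h ▸ hc
          · have := List.mem_takeWhile_imp (l := rest) (p := fun d => ¬ d == '\\') (ht ▸ h)
            simpa using this
        have hstep : (c :: rest : List Char) = (c :: t) ++ w := by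
          rw [hrest]; simp
        conv_lhs => rw [hstep]
        rw [pvLoopA_seg (c :: t) w htn]
        rw [pvLoopB.eq_def]
        have hlen : t.length + w.length = rest.length := by
          rw [hrest]; simp
        simp only [List.length_cons] at hl
        have hA : pvLoopA w = pvLoopB w := ih w (by omega)
        have hT : List.takeWhile (fun d => !decide (d = '\\')) rest = t := by
          rw [ht]; congr 1; funext d; simp
        have hW : List.dropWhile (fun d => !decide (d = '\\')) rest = w := by
          rw [hw]; congr 1; funext d; simp
        simp [hc, hA, hT, hW]

-- when no character is special (in particular no backslash), A's loop is the identity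
theorem pvLoopA_id (l : List Char) (h : l.any pvSpecial = false) : pvLoopA l = l := by
  induction l with
  | nil => simp [pvLoopA]
  | cons c rest ih =>
    simp only [List.any_cons, Bool.or_eq_false_iff] at h
    have hc : c ≠ '\\' := by
      intro hb; rw [hb] at h; exact absurd h.1 (by decide)
    conv_lhs => rw [pvLoopA.eq_def]
    simp [hc, h.1, ih h.2]

-- ===== VERDICT (by name: the statement is the Claim_ definition above) =====
theorem escape_for_cpe23_fs_spec : Claim_equal_escape_for_cpe23_fs := by
  unfold Claim_equal_escape_for_cpe23_fs
  intro element _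
  unfold Spec_escape_for_cpe23_fs escape_for_cpe23_fs escape_for_cpe23_fs_alt
  by_cases h0 : element = "*" ∨ element = "-" ∨ element = ""
  · simp [h0]
  · rw [if_neg h0, if_neg h0]
    have heq := pvLoopA_eq_loopB element.toList.length element.toList (le_refl _)
    by_cases hs : element.toList.any pvSpecial
    · rw [if_pos hs, heq]
    · rw [if_neg hs, ← heq, pvLoopA_id element.toList (by simpa using hs)]
      exact String.ofList_toList.symm
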